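-- pv_equiv track=rewrite | github.com/NSLS2/hrd_tools | sims/ingest_runs.py | aggregate_min_max
-- ===== SOURCE A (Python) =====
-- from typing import Any
--
-- def aggregate_min_max(
--     data: list[dict[str, dict[str, Any]]],
-- ) -> dict[str, tuple[Any, Any]]:
--     """
--     Aggregate a list of nested dictionaries into a single dictionary.
--
--     Each key in the output is formed by concatenating the outer and inner keys with a dot.
--     The corresponding value is a tuple (min, max) representing the minimum and maximum values
--     found for that inner key across all dictionaries.
--
--     Parameters
--     ----------
--     data : list of dict[str, dict[str, Any]]
--         A list of dictionaries where each dictionary maps an outer key (str) to an inner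
--         dictionary (dict[str, Any]). The inner dictionary's values should be comparable
--         (e.g., numbers).
--
--     Returns
--     -------
--     dict[str, tuple[Any, Any]]
--         A dictionary with keys in the format "outer.inner" and values as tuples (min, max)
--         computed from the aggregated inner dictionary values.
--
--     Examples
--     --------
--     >>> data = [
--     ...     {"A": {"x": 10, "y": 20}},
--     ...     {"A": {"x": 15, "y": 25}},
--     ...     {"B": {"z": 5}},
--     ...     {"B": {"z": 7, "w": 3}}
--     ... ]
--     >>> aggregate_min_max(data)
--     {'A.x': (10, 15), 'A.y': (20, 25), 'B.z': (5, 7), 'B.w': (3, 3)}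
--     """
--     result: dict[str, tuple[Any, Any]] = {}
--
--     for outer_dict in data:
--         for outer_key, inner_dict in outer_dict.items():
--             for inner_key, value in inner_dict.items():
--                 composite_key = f"{outer_key}.{inner_key}"
--                 if composite_key not in result:
--                     result[composite_key] = (value, value)
--                 else:
--                     current_min, current_max = result[composite_key]
--                     result[composite_key] = (
--                         min(current_min, value),
--                         max(current_max, value),
--                     )
--
--     return result
-- ===== SOURCE B (Python) =====
-- def aggregate_min_max(data):
--     buckets: dict[str, list] = {}
--     for outer_dict in data:
--         for outer_key, inner_dict in outer_dict.items():
--             for inner_key, value in inner_dict.items():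
--                 buckets.setdefault(f"{outer_key}.{inner_key}", []).append(value)
--     return {key: (min(vals), max(vals)) for key, vals in buckets.items()}
-- ===== Notes on version B (the rewrite author's own statement) =====
-- stated objective: simpler
-- what changed: B replaces A's online first-seen/else incremental (min,max) update with a two-pass group-then-reduce: pass one appends every value to a per-composite-key bucket list, pass two maps each bucket to (min(vals), max(vals)); Pre_ only excludes association lists with duplicate keys inside one dict, which a Python dict cannot represent.
import Mathlib
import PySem

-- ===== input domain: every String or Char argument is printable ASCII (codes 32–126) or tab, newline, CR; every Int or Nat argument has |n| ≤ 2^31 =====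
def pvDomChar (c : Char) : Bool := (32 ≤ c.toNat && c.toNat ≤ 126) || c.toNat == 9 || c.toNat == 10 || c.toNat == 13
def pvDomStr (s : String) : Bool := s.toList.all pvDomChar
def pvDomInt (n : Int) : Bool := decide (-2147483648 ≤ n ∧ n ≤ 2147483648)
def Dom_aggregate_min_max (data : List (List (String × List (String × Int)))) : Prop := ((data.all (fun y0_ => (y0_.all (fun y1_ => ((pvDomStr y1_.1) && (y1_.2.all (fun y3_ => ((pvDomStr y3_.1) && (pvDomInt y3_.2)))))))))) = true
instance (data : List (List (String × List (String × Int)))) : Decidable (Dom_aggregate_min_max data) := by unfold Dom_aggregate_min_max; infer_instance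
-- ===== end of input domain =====

-- B replaces A's online incremental (min,max) update with a group-then-reduce over bucket lists
-- (objective: simpler decomposition; no speed claim).

-- ===== PORT A =====
-- loop body of A: one (composite_key, value) update of the result dict
def pvStepA (d : PySem.Dict String (Int × Int)) (ck : String) (v : Int) : PySem.Dict String (Int × Int) :=
  if d.contains ck = false then
    d.insert ck (v, v)
  else
    -- result[composite_key]: the key is present in this branch, so the default is never used
    let cur := d.getD ck (0, 0)
    d.insert ck (min cur.1 v, max cur.2 v)

def aggregate_min_max (data : List (List (String × List (String × Int)))) : List (String × Int × Int) :=
  (data.foldl (fun res od =>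
      od.foldl (fun res p =>
        p.2.foldl (fun res q => pvStepA res (p.1 ++ "." ++ q.1) q.2) res) res)
    PySem.Dict.empty).items

-- ===== PORT B =====
-- min(vals) / max(vals) on a nonempty int list, ported by hand (exact there: Python folds left with <)
def pvMinList (vs : List Int) : Int := match vs with | [] => 0 | h :: t => t.foldl min h
def pvMaxList (vs : List Int) : Int := match vs with | [] => 0 | h :: t => t.foldl max h

-- loop body of B's pass one: buckets.setdefault(ck, []).append(v)
def pvStepB (d : PySem.Dict String (List Int)) (ck : String) (v : Int) : PySem.Dict String (List Int) :=
  d.insert ck (d.getD ck [] ++ [v])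

def aggregate_min_max_alt (data : List (List (String × List (String × Int)))) : List (String × Int × Int) :=
  ((data.foldl (fun b od =>
      od.foldl (fun b p =>
        p.2.foldl (fun b q => pvStepB b (p.1 ++ "." ++ q.1) q.2) b) b)
    PySem.Dict.empty).items).map (fun p => (p.1, pvMinList p.2, pvMaxList p.2))

-- ===== PRECONDITION & SPEC =====
-- Pre_ excludes association lists carrying a duplicate key inside one (outer or inner) dict:
-- such inputs cannot arise from a Python dict value, whose keys are unique.
def Pre_aggregate_min_max (data : List (List (String × List (String × Int)))) : Prop :=
  ∀ od ∈ data, (od.map Prod.fst).Nodup ∧ ∀ p ∈ od, (p.2.map Prod.fst).Nodup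
instance (data : List (List (String × List (String × Int)))) : Decidable (Pre_aggregate_min_max data) := by
  unfold Pre_aggregate_min_max; infer_instance

def pvWitness_aggregate_min_max : (List (List (String × List (String × Int)))) :=
  [[("A", [("x", 10), ("y", 20)])], [("A", [("x", 15), ("y", 25)])],
   [("B", [("z", 5)])], [("B", [("z", 7), ("w", 3)])]]

def Spec_aggregate_min_max (data : List (List (String × List (String × Int)))) (out : List (String × Int × Int)) : Prop := out = aggregate_min_max_alt data
instance (data : List (List (String × List (String × Int)))) (out : List (String × Int × Int)) : Decidable (Spec_aggregate_min_max data out) := by unfold Spec_aggregate_min_max; infer_instance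

-- ===== CLAIM (what is proved, stated in full; the proofs are below) =====
def Claim_equal_aggregate_min_max : Prop := ∀ (data : List (List (String × List (String × Int)))), Dom_aggregate_min_max data → Pre_aggregate_min_max data → Spec_aggregate_min_max data (aggregate_min_max data)

-- ===== LEMMAS AND PROOFS =====

-- invariant tying A's running (min,max) dict to B's running bucket dict
def pvInv (da : PySem.Dict String (Int × Int)) (db : PySem.Dict String (List Int)) : Prop :=
  da.keys = db.keys ∧ da.keys.Nodup ∧
  (∀ k, da.getD k (0, 0) = (pvMinList (db.getD k []), pvMaxList (db.getD k []))) ∧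
  (∀ k, db.contains k = true → db.getD k [] ≠ [])

lemma pvInv_empty : pvInv PySem.Dict.empty PySem.Dict.empty := by
  refine ⟨by simp [pysem], by simp [pysem], fun k => by simp [pysem, pvMinList, pvMaxList], fun k h => by simp [pysem] at h⟩

lemma pvInv_step (da : PySem.Dict String (Int × Int)) (db : PySem.Dict String (List Int))
    (ck : String) (v : Int) (h : pvInv da db) : pvInv (pvStepA da ck v) (pvStepB db ck v) := by
  obtain ⟨hk, hnd, hg, hne⟩ := h
  have hcc : da.contains ck = db.contains ck := by
    rw [PySem.Dict.contains_eq_decide_mem_keys, PySem.Dict.contains_eq_decide_mem_keys, hk]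
  by_cases hc : db.contains ck = false
  · -- fresh key: both sides insert a new entry for ck
    have hval : db.getD ck [] = [] := PySem.Dict.getD_of_not_contains _ _ hc
    refine ⟨?_, ?_, ?_, ?_⟩
    · rw [pvStepA, if_pos (hcc.trans hc), pvStepB,
        PySem.Dict.keys_insert_of_not_contains _ _ (hcc.trans hc),
        PySem.Dict.keys_insert_of_not_contains _ _ hc, hk]
    · rw [pvStepA, if_pos (hcc.trans hc)]
      exact PySem.Dict.nodup_keys_insert _ _ _ hnd
    · intro k
      rw [pvStepA, if_pos (hcc.trans hc), pvStepB]
      rw [PySem.Dict.getD_insert, PySem.Dict.getD_insert]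
      split_ifs with hkck
      · simp [hval, pvMinList, pvMaxList]
      · exact hg k
    · intro k hkc
      rw [pvStepB, PySem.Dict.getD_insert]
      rw [pvStepB, PySem.Dict.contains_insert] at hkc
      split_ifs with hkck
      · simp
      · apply hne
        rcases Bool.or_eq_true_iff.mp hkc with h1 | h1
        · exact absurd (by simpa using h1) hkck
        · exact h1
  · -- existing key: A updates (min,max), B appends to the nonempty bucket
    have hc' : db.contains ck = true := by revert hc; cases db.contains ck <;> simp
    obtain ⟨hhd, htl, hlist⟩ : ∃ hd tl, db.getD ck [] = hd :: tl := by
      cases hv : db.getD ck [] with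
      | nil => exact absurd hv (hne ck hc')
      | cons a b => exact ⟨a, b, rfl⟩
    have hAc : ¬ da.contains ck = false := by rw [hcc, hc']; simp
    refine ⟨?_, ?_, ?_, ?_⟩
    · rw [pvStepA, if_neg hAc, pvStepB,
        PySem.Dict.keys_insert_of_contains _ _ (hcc.trans hc'),
        PySem.Dict.keys_insert_of_contains _ _ hc', hk]
    · rw [pvStepA, if_neg hAc]
      exact PySem.Dict.nodup_keys_insert _ _ _ hnd
    · intro k
      rw [pvStepA, if_neg hAc, pvStepB]
      rw [PySem.Dict.getD_insert, PySem.Dict.getD_insert]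
      split_ifs with hkck
      · rw [hg ck, hlist]
        simp [pvMinList, pvMaxList, List.foldl_append]
      · exact hg k
    · intro k hkc
      rw [pvStepB, PySem.Dict.getD_insert]
      rw [pvStepB, PySem.Dict.contains_insert] at hkc
      split_ifs with hkck
      · simp [hlist]
      · apply hne
        rcases Bool.or_eq_true_iff.mp hkc with h1 | h1
        · exact absurd (by simpa using h1) hkck
        · exact h1

lemma pvInv_inner (ok : String) (l : List (String × Int)) :
    ∀ da db, pvInv da db →
      pvInv (l.foldl (fun res q => pvStepA res (ok ++ "." ++ q.1) q.2) da)
            (l.foldl (fun b q => pvStepB b (ok ++ "." ++ q.1) q.2) db) := by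
  induction l with
  | nil => intro da db h; exact h
  | cons q t ih => intro da db h; exact ih _ _ (pvInv_step _ _ _ _ h)

lemma pvInv_outer (od : List (String × List (String × Int))) :
    ∀ da db, pvInv da db →
      pvInv (od.foldl (fun res p => p.2.foldl (fun res q => pvStepA res (p.1 ++ "." ++ q.1) q.2) res) da)
            (od.foldl (fun b p => p.2.foldl (fun b q => pvStepB b (p.1 ++ "." ++ q.1) q.2) b) db) := by
  induction od with
  | nil => intro da db h; exact h
  | cons p t ih => intro da db h; exact ih _ _ (pvInv_inner _ _ _ _ h)

lemma pvInv_data (data : List (List (String × List (String × Int)))) :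
    ∀ da db, pvInv da db →
      pvInv (data.foldl (fun res od => od.foldl (fun res p => p.2.foldl (fun res q => pvStepA res (p.1 ++ "." ++ q.1) q.2) res) res) da)
            (data.foldl (fun b od => od.foldl (fun b p => p.2.foldl (fun b q => pvStepB b (p.1 ++ "." ++ q.1) q.2) b) b) db) := by
  induction data with
  | nil => intro da db h; exact h
  | cons od t ih => intro da db h; exact ih _ _ (pvInv_outer _ _ _ h)

lemma pvInv_items (da : PySem.Dict String (Int × Int)) (db : PySem.Dict String (List Int))
    (h : pvInv da db) : da.items = db.items.map (fun p => (p.1, pvMinList p.2, pvMaxList p.2)) := by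
  obtain ⟨hk, hnd, hg, _⟩ := h
  have hndb : db.keys.Nodup := hk ▸ hnd
  rw [PySem.Dict.items_eq_map_keys da hnd (0, 0), PySem.Dict.items_eq_map_keys db hndb [],
    List.map_map, hk]
  exact List.map_congr_left (fun k _ => by simp [Function.comp, hg k])

-- ===== VERDICT (by name: the statement is the Claim_ definition above) =====
theorem aggregate_min_max_spec : Claim_equal_aggregate_min_max := by
  intro data _ _
  show aggregate_min_max data = aggregate_min_max_alt data
  exact pvInv_items _ _ (pvInv_data data _ _ pvInv_empty)
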